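-- pv_equiv track=rewrite | github.com/kiriman/gar-converter | mysql_to_postgres_exporter.py | _get_tables_in_order
-- ===== SOURCE A (Python) =====
-- def _get_tables_in_order(tables):
--     """
--     Сортирует таблицы для правильного порядка импорта
--
--     Args:
--         tables (list): Список имен таблиц
--
--     Returns:
--         list: Отсортированный список таблиц
--     """
--     # Типы таблиц (справочники), которые должны импортироваться первыми
--     reference_tables_patterns = [
--         '_TYPES', 'LEVELS', 'KINDS', 'REESTR_OBJECTS'
--     ]
--
--     # Таблицы, которые должны импортироваться в середине
--     middle_tables_patterns = [
--         'ADDR_OBJ', 'STEADS', 'HOUSES', 'APARTMENTS', 'ROOMS', 'CARPLACES'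
--     ]
--
--     # Таблицы, которые должны импортироваться в конце (содержат связи)
--     last_tables_patterns = [
--         '_PARAMS', '_HIERARCHY', '_DIVISION', 'CHANGE_HISTORY', 'NORMATIVE_DOCS'
--     ]
--
--     # Сортируем таблицы по приоритету
--     reference_tables = []
--     middle_tables = []
--     last_tables = []
--     other_tables = []
--
--     for table in tables:
--         # Проверяем, является ли таблица справочником
--         if any(pattern in table for pattern in reference_tables_patterns):
--             reference_tables.append(table)
--         # Проверяем, является ли таблица промежуточной
--         elif any(pattern in table for pattern in middle_tables_patterns):
--             middle_tables.append(table)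
--         # Проверяем, является ли таблица финальной
--         elif any(pattern in table for pattern in last_tables_patterns):
--             last_tables.append(table)
--         # Иначе добавляем в другие таблицы
--         else:
--             other_tables.append(table)
--
--     # Возвращаем отсортированный список
--     return reference_tables + other_tables + middle_tables + last_tables
-- ===== SOURCE B (Python) =====
-- def _get_tables_in_order(tables):
--     """Stable sort by a priority rank instead of four explicit buckets."""
--     reference_tables_patterns = [
--         '_TYPES', 'LEVELS', 'KINDS', 'REESTR_OBJECTS'
--     ]
--     middle_tables_patterns = [
--         'ADDR_OBJ', 'STEADS', 'HOUSES', 'APARTMENTS', 'ROOMS', 'CARPLACES'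
--     ]
--     last_tables_patterns = [
--         '_PARAMS', '_HIERARCHY', '_DIVISION', 'CHANGE_HISTORY', 'NORMATIVE_DOCS'
--     ]
--
--     def rank(table):
--         if any(pattern in table for pattern in reference_tables_patterns):
--             return 0
--         if any(pattern in table for pattern in middle_tables_patterns):
--             return 2
--         if any(pattern in table for pattern in last_tables_patterns):
--             return 3
--         return 1
--
--     return sorted(tables, key=rank)
-- ===== Notes on version B (the rewrite author's own statement) =====
-- stated objective: simpler
-- what changed: Replaces the four explicit buckets and their concatenation by a single stable sort keyed on a priority rank (reference=0, other=1, middle=2, last=3), relying on sort stability for within-group order.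
import Mathlib
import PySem

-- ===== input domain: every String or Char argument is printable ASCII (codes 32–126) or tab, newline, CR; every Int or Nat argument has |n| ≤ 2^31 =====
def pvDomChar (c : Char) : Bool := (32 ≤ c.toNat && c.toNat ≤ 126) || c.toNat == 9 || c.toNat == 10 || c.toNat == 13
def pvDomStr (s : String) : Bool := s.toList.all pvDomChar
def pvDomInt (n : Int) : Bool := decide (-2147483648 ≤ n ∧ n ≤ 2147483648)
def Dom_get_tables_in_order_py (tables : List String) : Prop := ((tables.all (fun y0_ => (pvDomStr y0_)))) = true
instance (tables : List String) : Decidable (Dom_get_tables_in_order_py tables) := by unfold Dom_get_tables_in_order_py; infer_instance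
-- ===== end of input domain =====

-- B replaces A's four explicit buckets + concatenation by one stable sort on a priority rank; objective: simpler.


-- ===== PORT A =====
-- the three pattern lists (module-level data shared verbatim by both Pythons)
def pvRefPats : List String := ["_TYPES", "LEVELS", "KINDS", "REESTR_OBJECTS"]
def pvMidPats : List String := ["ADDR_OBJ", "STEADS", "HOUSES", "APARTMENTS", "ROOMS", "CARPLACES"]
def pvLastPats : List String := ["_PARAMS", "_HIERARCHY", "_DIVISION", "CHANGE_HISTORY", "NORMATIVE_DOCS"]

def get_tables_in_order_py (tables : List String) : List String :=
  -- four accumulators (reference, middle, last, other), filled by one pass, then concatenated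
  let st := tables.foldl
    (fun (acc : List String × List String × List String × List String) table =>
      let (r, m, l, o) := acc
      if pvRefPats.any (fun p => PySem.Str.isIn p table) then (r ++ [table], m, l, o)
      else if pvMidPats.any (fun p => PySem.Str.isIn p table) then (r, m ++ [table], l, o)
      else if pvLastPats.any (fun p => PySem.Str.isIn p table) then (r, m, l ++ [table], o)
      else (r, m, l, o ++ [table]))
    ([], [], [], [])
  st.1 ++ st.2.2.2 ++ st.2.1 ++ st.2.2.1

-- ===== PORT B =====
def pvRank (table : String) : Int :=
  if pvRefPats.any (fun p => PySem.Str.isIn p table) then 0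
  else if pvMidPats.any (fun p => PySem.Str.isIn p table) then 2
  else if pvLastPats.any (fun p => PySem.Str.isIn p table) then 3
  else 1

def get_tables_in_order_py_alt (tables : List String) : List String :=
  PySem.List.sorted tables pvRank

-- ===== PRECONDITION & SPEC =====
def Spec_get_tables_in_order_py (tables : List String) (out : List String) : Prop := out = get_tables_in_order_py_alt tables
instance (tables : List String) (out : List String) : Decidable (Spec_get_tables_in_order_py tables out) := by unfold Spec_get_tables_in_order_py; infer_instance

-- ===== CLAIM (what is proved, stated in full; the proofs are below) =====
def Claim_equal_get_tables_in_order_py : Prop := ∀ (tables : List String), Dom_get_tables_in_order_py tables → Spec_get_tables_in_order_py tables (get_tables_in_order_py tables)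

-- ===== LEMMAS AND PROOFS =====

-- rank-k bucket of a list
def pvF (k : Int) (xs : List String) : List String := xs.filter (fun t => pvRank t == k)

theorem pvRank_cases (t : String) : pvRank t = 0 ∨ pvRank t = 1 ∨ pvRank t = 2 ∨ pvRank t = 3 := by
  unfold pvRank; split_ifs <;> simp

theorem mem_pvF_rank {k : Int} {xs : List String} {y : String} (h : y ∈ pvF k xs) : pvRank y = k := by
  have := List.of_mem_filter h; simpa using this

-- insertBy skips a prefix it is not "before"
theorem insertBy_append_not_before (before : String → String → Bool) (x : String) :
    ∀ (u v : List String), (∀ y ∈ u, before x y = false) →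
      PySem.List.insertBy before x (u ++ v) = u ++ PySem.List.insertBy before x v := by
  intro u
  induction u with
  | nil => intro v _; simp
  | cons a u ih =>
    intro v h
    have ha : before x a = false := h a (by simp)
    simp only [List.cons_append, PySem.List.insertBy, ha]
    simp [ih v (fun y hy => h y (by simp [hy]))]

-- insertBy puts x in front when it is "before" every element
theorem insertBy_forall_before (before : String → String → Bool) (x : String) :
    ∀ (t : List String), (∀ y ∈ t, before x y = true) →
      PySem.List.insertBy before x t = x :: t := by
  intro t h
  cases t with
  | nil => rfl
  | cons a t => simp [PySem.List.insertBy, h a (by simp)]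

-- stable sort by pvRank = concatenation of the four rank buckets
theorem insertBy_mid (before : String → String → Bool) (x : String)
    (u t : List String) (hu : ∀ y ∈ u, before x y = false) (ht : ∀ y ∈ t, before x y = true) :
    PySem.List.insertBy before x (u ++ t) = u ++ x :: t := by
  rw [insertBy_append_not_before before x u t hu, insertBy_forall_before before x t ht]

theorem sorted_rank_eq_buckets (xs : List String) :
    PySem.List.sorted xs pvRank = pvF 0 xs ++ pvF 1 xs ++ pvF 2 xs ++ pvF 3 xs := by
  induction xs using List.reverseRecOn with
  | nil => rfl
  | append_singleton xs x ih =>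
    have hstep : PySem.List.sorted (xs ++ [x]) pvRank =
        PySem.List.insertBy (fun a b => decide (pvRank a < pvRank b)) x (PySem.List.sorted xs pvRank) := by
      rw [PySem.List.sorted_eq_foldl_insertBy, PySem.List.sorted_eq_foldl_insertBy, List.foldl_append]
      rfl
    rw [hstep, ih]
    have hF : ∀ k : Int, pvF k (xs ++ [x]) = pvF k xs ++ (if pvRank x == k then [x] else []) := by
      intro k; simp [pvF, List.filter_append, List.filter_cons]
    set bef : String → String → Bool := fun a b => decide (pvRank a < pvRank b) with hbef
    have hno : ∀ (k : Int), ¬ (pvRank x < k) → ∀ y ∈ pvF k xs, bef x y = false := by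
      intro k hk y hy
      simp [hbef, mem_pvF_rank hy, hk]
    have hyes : ∀ (k : Int), pvRank x < k → ∀ y ∈ pvF k xs, bef x y = true := by
      intro k hk y hy
      simp [hbef, mem_pvF_rank hy, hk]
    rcases pvRank_cases x with h | h | h | h
    · -- rank 0 : x goes in front of buckets 1,2,3
      have := insertBy_mid bef x (pvF 0 xs) (pvF 1 xs ++ pvF 2 xs ++ pvF 3 xs)
        (hno 0 (by omega)) (by
          intro y hy
          simp only [List.append_assoc, List.mem_append] at hy
          rcases hy with hy | hy | hy
          · exact hyes 1 (by omega) y hy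
          · exact hyes 2 (by omega) y hy
          · exact hyes 3 (by omega) y hy)
      simp only [hF, h, List.append_assoc] at this ⊢
      norm_num
      simpa [List.append_assoc] using this
    · -- rank 1 : after buckets 0,1, before 2,3
      have := insertBy_mid bef x (pvF 0 xs ++ pvF 1 xs) (pvF 2 xs ++ pvF 3 xs)
        (by
          intro y hy
          simp only [List.mem_append] at hy
          rcases hy with hy | hy
          · exact hno 0 (by omega) y hy
          · exact hno 1 (by omega) y hy)
        (by
          intro y hy
          simp only [List.mem_append] at hy
          rcases hy with hy | hy
          · exact hyes 2 (by omega) y hy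
          · exact hyes 3 (by omega) y hy)
      simp only [hF, h, List.append_assoc] at this ⊢
      norm_num
      simpa [List.append_assoc] using this
    · -- rank 2 : after buckets 0,1,2, before 3
      have := insertBy_mid bef x (pvF 0 xs ++ pvF 1 xs ++ pvF 2 xs) (pvF 3 xs)
        (by
          intro y hy
          simp only [List.append_assoc, List.mem_append] at hy
          rcases hy with hy | hy | hy
          · exact hno 0 (by omega) y hy
          · exact hno 1 (by omega) y hy
          · exact hno 2 (by omega) y hy)
        (hyes 3 (by omega))
      simp only [hF, h, List.append_assoc] at this ⊢
      norm_num
      simpa [List.append_assoc] using this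
    · -- rank 3 : at the very end
      have := PySem.List.insertBy_of_forall_not_before bef x
        (pvF 0 xs ++ pvF 1 xs ++ pvF 2 xs ++ pvF 3 xs) (by
          intro y hy
          simp only [List.append_assoc, List.mem_append] at hy
          rcases hy with hy | hy | hy | hy
          · exact hno 0 (by omega) y hy
          · exact hno 1 (by omega) y hy
          · exact hno 2 (by omega) y hy
          · exact hno 3 (by omega) y hy)
      simp only [hF, h, List.append_assoc] at this ⊢
      norm_num
      simpa [List.append_assoc] using this

-- A's one-pass bucket fold, characterised by the rank buckets
theorem foldA_invariant (xs : List String) :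
    ∀ (r m l o : List String),
      xs.foldl
        (fun (acc : List String × List String × List String × List String) table =>
          let (r, m, l, o) := acc
          if pvRefPats.any (fun p => PySem.Str.isIn p table) then (r ++ [table], m, l, o)
          else if pvMidPats.any (fun p => PySem.Str.isIn p table) then (r, m ++ [table], l, o)
          else if pvLastPats.any (fun p => PySem.Str.isIn p table) then (r, m, l ++ [table], o)
          else (r, m, l, o ++ [table])) (r, m, l, o)
      = (r ++ pvF 0 xs, m ++ pvF 2 xs, l ++ pvF 3 xs, o ++ pvF 1 xs) := by
  induction xs with
  | nil => intro r m l o; simp [pvF]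
  | cons x xs ih =>
    intro r m l o
    simp only [List.foldl_cons]
    split_ifs with h1 h2 h3
    · have hr : pvRank x = 0 := by unfold pvRank; rw [if_pos h1]
      rw [ih]; simp [pvF, hr]
    · have hr : pvRank x = 2 := by unfold pvRank; rw [if_neg h1, if_pos h2]
      rw [ih]; simp [pvF, hr]
    · have hr : pvRank x = 3 := by unfold pvRank; rw [if_neg h1, if_neg h2, if_pos h3]
      rw [ih]; simp [pvF, hr]
    · have hr : pvRank x = 1 := by unfold pvRank; rw [if_neg h1, if_neg h2, if_neg h3]
      rw [ih]; simp [pvF, hr]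

-- ===== VERDICT (by name: the statement is the Claim_ definition above) =====
theorem get_tables_in_order_py_spec : Claim_equal_get_tables_in_order_py := by
  intro tables _
  unfold Spec_get_tables_in_order_py get_tables_in_order_py get_tables_in_order_py_alt
  rw [foldA_invariant tables [] [] [] [], sorted_rank_eq_buckets]
  simp
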